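-- pv_equiv track=rewrite | github.com/eareyan/pysegta | poker_game.py | poker_player_utility
-- ===== SOURCE A (Python) =====
-- def sort_hand(hand):
--     """
--     :param hand:
--     :return: sorted hand, first by suit then by number.
--     """
--     return tuple(sorted(sorted(hand, key=lambda x: x[0]), key=lambda x: x[1]))
--
-- def poker_player_utility(player, strategy_profile, condition):
--     """
--     Given a player and a pure strategy profile, returns the utility of the player in the strategy profile.
--     :param player:
--     :param strategy_profile:
--     :param condition:
--     :return:
--     """
--     u = []
--     u_squared = []
--     winner_point = 1
--
--     player_hand = strategy_profile[0] if player == 1 else strategy_profile[1]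
--     opponent_hand = strategy_profile[1] if player == 1 else strategy_profile[0]
--
--     for dealer_card in condition:
--         player_hand_rank = hand_rank(sort_hand(player_hand + (dealer_card,)))
--         oppone_hand_rank = hand_rank(sort_hand(opponent_hand + (dealer_card,)))
--         if player_hand_rank == oppone_hand_rank:
--             u.append(0)
--             u_squared.append(0)
--         elif player_hand_rank < oppone_hand_rank:
--             u.append(winner_point)
--             u_squared.append(winner_point * winner_point)
--         else:
--             u.append(-winner_point)
--             u_squared.append(-winner_point * -winner_point)
--
--     return len(condition), sum(u), sum(u_squared)
--
-- def hand_rank(hand):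
--     """
--     Computes the rank of a hand, a number between 1 and 9, where lower numbers indicate better hands.
--     Assumes the hand is given in ascending order of number.
--     :param hand: a tuple with 5 tuples, each inner tuple representing a card from a standard deck.
--     :return: the rank of the hand, a number between 1 and 9, where lower numbers indicate better hands.
--     """
--     # A hand must consist of 5 cards.
--     assert len(hand) == 5
--
--     # Straight flush.
--     if all(hand[0][0] == card[0] for card in hand) and all(
--         hand[i + 1][1] - hand[i][1] == 1 for i in [0, 1, 2, 3]
--     ):
--         return 1
--
--     # Four of a kind.
--     elif all(hand[0][1] == hand[i][1] for i in [1, 2, 3]) or all(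
--         hand[1][1] == hand[i][1] for i in [2, 3, 4]
--     ):
--         return 2
--
--     # Full house.
--     elif (
--         all(hand[0][1] == hand[i][1] for i in [1, 2]) and hand[3][1] == hand[4][1]
--     ) or (all(hand[2][1] == hand[i][1] for i in [3, 4]) and hand[0][1] == hand[1][1]):
--         return 3
--
--     # Flush.
--     elif all(hand[0][0] == card[0] for card in hand):
--         return 4
--
--     # Straight.
--     elif all(hand[i + 1][1] - hand[i][1] == 1 for i in [0, 1, 2, 3]):
--         return 5
--
--     # Three of a king
--     elif (
--         all(hand[0][1] == hand[i][1] for i in [1, 2])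
--         or all(hand[1][1] == hand[i][1] for i in [2, 3])
--         or all(hand[2][1] == hand[i][1] for i in [3, 4])
--     ):
--         return 6
--
--     # Tow pair
--     elif (
--         (hand[0][1] == hand[1][1] and hand[2][1] == hand[3][1])
--         or (hand[1][1] == hand[2][1] and hand[3][1] == hand[4][1])
--         or (hand[0][1] == hand[1][1] and hand[3][1] == hand[4][1])
--     ):
--         return 7
--
--     # One pair
--     elif any(hand[i][1] == hand[i + 1][1] for i in range(0, 4)):
--         return 8
--
--     # High card
--     return 9
-- ===== SOURCE B (Python) =====
-- def _alt_rank(cards):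
--     """Classify via distinct-value count / max multiplicity instead of positional patterns on a sorted hand."""
--     assert len(cards) == 5
--     values = [v for _, v in cards]
--     distinct = len(set(values))
--     top = max(values.count(v) for v in values)
--     flush = all(s == cards[0][0] for s, _ in cards)
--     straight = distinct == 5 and max(values) - min(values) == 4
--     if flush and straight:
--         return 1
--     if top >= 4:
--         return 2
--     if distinct == 2:
--         return 3
--     if flush:
--         return 4
--     if straight:
--         return 5
--     if top == 3:
--         return 6
--     if distinct == 3:
--         return 7
--     if distinct == 4:
--         return 8
--     return 9
--
-- def poker_player_utility(player, strategy_profile, condition):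
--     if player == 1:
--         mine, theirs = strategy_profile[0], strategy_profile[1]
--     else:
--         mine, theirs = strategy_profile[1], strategy_profile[0]
--     wins = 0
--     losses = 0
--     for dealer_card in condition:
--         pr = _alt_rank(list(mine) + [dealer_card])
--         qr = _alt_rank(list(theirs) + [dealer_card])
--         if pr < qr:
--             wins += 1
--         elif qr < pr:
--             losses += 1
--     return len(condition), wins - losses, wins + losses
-- ===== Notes on version B (the rewrite author's own statement) =====
-- stated objective: alternative
-- what changed: B classifies each 5-card hand by its number of distinct values and maximum value-multiplicity (plus flush/straight flags) instead of sorting the hand and pattern-matching positional equalities, and accumulates win/loss counters instead of building u and u_squared lists.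
import Mathlib
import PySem

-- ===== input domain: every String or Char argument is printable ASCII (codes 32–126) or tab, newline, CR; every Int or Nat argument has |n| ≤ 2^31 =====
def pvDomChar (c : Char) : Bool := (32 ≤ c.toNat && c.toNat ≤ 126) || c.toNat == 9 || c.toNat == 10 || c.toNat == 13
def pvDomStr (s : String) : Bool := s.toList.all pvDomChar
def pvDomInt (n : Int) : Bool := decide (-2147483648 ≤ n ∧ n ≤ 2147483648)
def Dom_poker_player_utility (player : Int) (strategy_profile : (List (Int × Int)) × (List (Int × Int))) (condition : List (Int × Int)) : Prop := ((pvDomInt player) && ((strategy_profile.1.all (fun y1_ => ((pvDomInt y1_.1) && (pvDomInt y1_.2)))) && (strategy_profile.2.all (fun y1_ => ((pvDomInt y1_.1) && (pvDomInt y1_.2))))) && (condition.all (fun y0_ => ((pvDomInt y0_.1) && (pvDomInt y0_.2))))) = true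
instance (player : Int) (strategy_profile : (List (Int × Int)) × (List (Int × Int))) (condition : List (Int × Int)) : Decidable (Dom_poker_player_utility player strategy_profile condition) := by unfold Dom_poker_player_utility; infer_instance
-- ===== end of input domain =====

-- B reclassifies a hand by distinct-value count and maximum multiplicity (no sorting of the hand),
-- and keeps win/loss counters instead of the u / u_squared lists (objective: alternative).


-- ===== PORT A =====
-- sort_hand: tuple(sorted(sorted(hand, key=lambda x: x[0]), key=lambda x: x[1]))
def pvA_sort_hand (hand : List (Int × Int)) : List (Int × Int) :=
  PySem.List.sorted (PySem.List.sorted hand (fun x => x.1)) (fun x => x.2)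

-- hand_rank: the hand must have exactly 5 cards (Python asserts otherwise; those inputs are outside Pre_,
-- the catch-all branch returns 0 there).
def pvA_hand_rank (hand : List (Int × Int)) : Int :=
  match hand with
  | [c0, c1, c2, c3, c4] =>
    -- straight flush
    if (c0.1 == c0.1 && c0.1 == c1.1 && c0.1 == c2.1 && c0.1 == c3.1 && c0.1 == c4.1) &&
       (c1.2 - c0.2 == 1 && c2.2 - c1.2 == 1 && c3.2 - c2.2 == 1 && c4.2 - c3.2 == 1) then 1
    -- four of a kind
    else if (c0.2 == c1.2 && c0.2 == c2.2 && c0.2 == c3.2) ||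
            (c1.2 == c2.2 && c1.2 == c3.2 && c1.2 == c4.2) then 2
    -- full house
    else if ((c0.2 == c1.2 && c0.2 == c2.2) && c3.2 == c4.2) ||
            ((c2.2 == c3.2 && c2.2 == c4.2) && c0.2 == c1.2) then 3
    -- flush
    else if c0.1 == c0.1 && c0.1 == c1.1 && c0.1 == c2.1 && c0.1 == c3.1 && c0.1 == c4.1 then 4
    -- straight
    else if c1.2 - c0.2 == 1 && c2.2 - c1.2 == 1 && c3.2 - c2.2 == 1 && c4.2 - c3.2 == 1 then 5
    -- three of a kind
    else if (c0.2 == c1.2 && c0.2 == c2.2) || (c1.2 == c2.2 && c1.2 == c3.2) ||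
            (c2.2 == c3.2 && c2.2 == c4.2) then 6
    -- two pair
    else if (c0.2 == c1.2 && c2.2 == c3.2) || (c1.2 == c2.2 && c3.2 == c4.2) ||
            (c0.2 == c1.2 && c3.2 == c4.2) then 7
    -- one pair
    else if c0.2 == c1.2 || c1.2 == c2.2 || c2.2 == c3.2 || c3.2 == c4.2 then 8
    -- high card
    else 9
  | _ => 0

def poker_player_utility (player : Int) (strategy_profile : (List (Int × Int)) × (List (Int × Int))) (condition : List (Int × Int)) : Int × Int × Int :=
  let winner_point : Int := 1
  let player_hand := if player == 1 then strategy_profile.1 else strategy_profile.2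
  let opponent_hand := if player == 1 then strategy_profile.2 else strategy_profile.1
  let uu := condition.foldl (fun (acc : List Int × List Int) dealer_card =>
    let player_hand_rank := pvA_hand_rank (pvA_sort_hand (player_hand ++ [dealer_card]))
    let oppone_hand_rank := pvA_hand_rank (pvA_sort_hand (opponent_hand ++ [dealer_card]))
    if player_hand_rank == oppone_hand_rank then (acc.1 ++ [0], acc.2 ++ [0])
    else if player_hand_rank < oppone_hand_rank then
      (acc.1 ++ [winner_point], acc.2 ++ [winner_point * winner_point])
    else (acc.1 ++ [-winner_point], acc.2 ++ [-winner_point * -winner_point])) ([], [])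
  ((condition.length : Int), uu.1.sum, uu.2.sum)

-- ===== PORT B =====
-- _alt_rank from Source B; its `assert len(cards) == 5` (like A's) fails outside Pre_, where this port's
-- value is irrelevant; the [] branch only marks where Python's max() would raise.
def pvB_rank (cards : List (Int × Int)) : Int :=
  match cards with
  | [] => 0
  | c0 :: _ =>
    let values := cards.map (fun c => c.2)
    let distinct : Int := PySem.Set.len (PySem.Set.ofList values)
    let top : Int := ((PySem.List.max? (values.map (fun v => (values.count v : Int))) (fun x => x)).getD 0)
    let flush : Bool := cards.all (fun c => c.1 == c0.1)
    let straight : Bool := distinct == 5 &&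
      ((PySem.List.max? values (fun x => x)).getD 0 - (PySem.List.min? values (fun x => x)).getD 0 == 4)
    if flush && straight then 1
    else if 4 ≤ top then 2
    else if distinct == 2 then 3
    else if flush then 4
    else if straight then 5
    else if top == 3 then 6
    else if distinct == 3 then 7
    else if distinct == 4 then 8
    else 9

def poker_player_utility_alt (player : Int) (strategy_profile : (List (Int × Int)) × (List (Int × Int))) (condition : List (Int × Int)) : Int × Int × Int :=
  let hands := if player == 1 then (strategy_profile.1, strategy_profile.2)
               else (strategy_profile.2, strategy_profile.1)
  let wl := condition.foldl (fun (acc : Int × Int) dealer_card =>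
    let pr := pvB_rank (hands.1 ++ [dealer_card])
    let qr := pvB_rank (hands.2 ++ [dealer_card])
    if pr < qr then (acc.1 + 1, acc.2)
    else if qr < pr then (acc.1, acc.2 + 1)
    else acc) (0, 0)
  ((condition.length : Int), wl.1 - wl.2, wl.1 + wl.2)

-- ===== PRECONDITION & SPEC =====
-- Pre_ excludes only inputs where A RAISES: with a nonempty condition, hand_rank's `assert len(hand) == 5`
-- fails (AssertionError) unless both strategy hands have exactly 4 cards.
def Pre_poker_player_utility (player : Int) (strategy_profile : (List (Int × Int)) × (List (Int × Int))) (condition : List (Int × Int)) : Prop :=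
  condition = [] ∨ (strategy_profile.1.length = 4 ∧ strategy_profile.2.length = 4)
instance (player : Int) (strategy_profile : (List (Int × Int)) × (List (Int × Int))) (condition : List (Int × Int)) : Decidable (Pre_poker_player_utility player strategy_profile condition) := by unfold Pre_poker_player_utility; infer_instance

def pvWitness_poker_player_utility : Int × ((List (Int × Int)) × (List (Int × Int))) × (List (Int × Int)) :=
  (1, (([(0, 2), (0, 3), (0, 4), (0, 5)], [(1, 2), (2, 3), (3, 7), (0, 7)]), [(0, 6), (1, 2)]))

def Spec_poker_player_utility (player : Int) (strategy_profile : (List (Int × Int)) × (List (Int × Int))) (condition : List (Int × Int)) (out : Int × Int × Int) : Prop := out = poker_player_utility_alt player strategy_profile condition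
instance (player : Int) (strategy_profile : (List (Int × Int)) × (List (Int × Int))) (condition : List (Int × Int)) (out : Int × Int × Int) : Decidable (Spec_poker_player_utility player strategy_profile condition out) := by unfold Spec_poker_player_utility; infer_instance

-- ===== CLAIM (what is proved, stated in full; the proofs are below) =====
def Claim_equal_poker_player_utility : Prop := ∀ (player : Int) (strategy_profile : (List (Int × Int)) × (List (Int × Int))) (condition : List (Int × Int)), Dom_poker_player_utility player strategy_profile condition → Pre_poker_player_utility player strategy_profile condition → Spec_poker_player_utility player strategy_profile condition (poker_player_utility player strategy_profile condition)

-- ===== LEMMAS AND PROOFS =====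

-- A hand classification agrees branch by branch once the value pattern is decided.
set_option maxHeartbeats 4000000 in
theorem pv_rank_core (s0 s1 s2 s3 s4 v0 v1 v2 v3 v4 : Int)
    (h01 : v0 ≤ v1) (h12 : v1 ≤ v2) (h23 : v2 ≤ v3) (h34 : v3 ≤ v4) :
    pvA_hand_rank [(s0,v0),(s1,v1),(s2,v2),(s3,v3),(s4,v4)] =
    pvB_rank [(s0,v0),(s1,v1),(s2,v2),(s3,v3),(s4,v4)] := by
  by_cases e1 : v0 = v1 <;> by_cases e2 : v1 = v2 <;> by_cases e3 : v2 = v3 <;> by_cases e4 : v3 = v4 <;>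
  · try have : v0 = v1 := by omega
    try have : v0 < v1 := by omega
    try have : v0 ≠ v1 := by omega
    try have : v1 ≠ v0 := by omega
    try have : ¬ (v1 < v0) := by omega
    try have : ¬ (v0 < v1) := by omega
    try have : v0 = v2 := by omega
    try have : v0 < v2 := by omega
    try have : v0 ≠ v2 := by omega
    try have : v2 ≠ v0 := by omega
    try have : ¬ (v2 < v0) := by omega
    try have : ¬ (v0 < v2) := by omega
    try have : v0 = v3 := by omega
    try have : v0 < v3 := by omega
    try have : v0 ≠ v3 := by omega
    try have : v3 ≠ v0 := by omega
    try have : ¬ (v3 < v0) := by omega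
    try have : ¬ (v0 < v3) := by omega
    try have : v0 = v4 := by omega
    try have : v0 < v4 := by omega
    try have : v0 ≠ v4 := by omega
    try have : v4 ≠ v0 := by omega
    try have : ¬ (v4 < v0) := by omega
    try have : ¬ (v0 < v4) := by omega
    try have : v1 = v2 := by omega
    try have : v1 < v2 := by omega
    try have : v1 ≠ v2 := by omega
    try have : v2 ≠ v1 := by omega
    try have : ¬ (v2 < v1) := by omega
    try have : ¬ (v1 < v2) := by omega
    try have : v1 = v3 := by omega
    try have : v1 < v3 := by omega
    try have : v1 ≠ v3 := by omega
    try have : v3 ≠ v1 := by omega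
    try have : ¬ (v3 < v1) := by omega
    try have : ¬ (v1 < v3) := by omega
    try have : v1 = v4 := by omega
    try have : v1 < v4 := by omega
    try have : v1 ≠ v4 := by omega
    try have : v4 ≠ v1 := by omega
    try have : ¬ (v4 < v1) := by omega
    try have : ¬ (v1 < v4) := by omega
    try have : v2 = v3 := by omega
    try have : v2 < v3 := by omega
    try have : v2 ≠ v3 := by omega
    try have : v3 ≠ v2 := by omega
    try have : ¬ (v3 < v2) := by omega
    try have : ¬ (v2 < v3) := by omega
    try have : v2 = v4 := by omega
    try have : v2 < v4 := by omega
    try have : v2 ≠ v4 := by omega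
    try have : v4 ≠ v2 := by omega
    try have : ¬ (v4 < v2) := by omega
    try have : ¬ (v2 < v4) := by omega
    try have : v3 = v4 := by omega
    try have : v3 < v4 := by omega
    try have : v3 ≠ v4 := by omega
    try have : v4 ≠ v3 := by omega
    try have : ¬ (v4 < v3) := by omega
    try have : ¬ (v3 < v4) := by omega
    simp [pvA_hand_rank, pvB_rank, PySem.Set.ofList, PySem.Set.add, PySem.Set.len, PySem.Set.contains,
          PySem.List.max?, PySem.List.min?, List.count_cons, List.count_nil, *]
    try split_ifs <;> omega

-- B's rank only depends on the multiset of cards.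
theorem pv_max_id_perm {l l' : List Int} (hp : l.Perm l') :
    PySem.List.max? l (fun x => x) = PySem.List.max? l' (fun x => x) := by
  cases e : PySem.List.max? l (fun x => x) with
  | none =>
    have hl : l = [] := (PySem.List.max?_eq_none_iff _ _).mp e
    subst hl
    have hl' : l' = [] := hp.symm.eq_nil
    simp [hl', PySem.List.max?]
  | some m =>
    cases e' : PySem.List.max? l' (fun x => x) with
    | none =>
      have hl' : l' = [] := (PySem.List.max?_eq_none_iff _ _).mp e'
      subst hl'
      have hl : l = [] := hp.eq_nil
      subst hl
      rw [(PySem.List.max?_eq_none_iff _ _).mpr rfl] at e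
      exact absurd e (by simp)
    | some m' =>
      have h1 : m ≤ m' := PySem.List.max?_isMax e' m (hp.mem_iff.mp (PySem.List.max?_mem e))
      have h2 : m' ≤ m := PySem.List.max?_isMax e m' (hp.mem_iff.mpr (PySem.List.max?_mem e'))
      exact congrArg some (le_antisymm h1 h2)

theorem pv_min_id_perm {l l' : List Int} (hp : l.Perm l') :
    PySem.List.min? l (fun x => x) = PySem.List.min? l' (fun x => x) := by
  cases e : PySem.List.min? l (fun x => x) with
  | none =>
    have hl : l = [] := (PySem.List.min?_eq_none_iff _ _).mp e
    subst hl
    have hl' : l' = [] := hp.symm.eq_nil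
    simp [hl', PySem.List.min?]
  | some m =>
    cases e' : PySem.List.min? l' (fun x => x) with
    | none =>
      have hl' : l' = [] := (PySem.List.min?_eq_none_iff _ _).mp e'
      subst hl'
      have hl : l = [] := hp.eq_nil
      subst hl
      rw [(PySem.List.min?_eq_none_iff _ _).mpr rfl] at e
      exact absurd e (by simp)
    | some m' =>
      have h1 : m ≤ m' := PySem.List.min?_isMin e m' (hp.mem_iff.mpr (PySem.List.min?_mem e'))
      have h2 : m' ≤ m := PySem.List.min?_isMin e' m (hp.mem_iff.mp (PySem.List.min?_mem e))
      exact congrArg some (le_antisymm h1 h2)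

theorem pv_setlen_perm {l l' : List Int} (hp : l.Perm l') :
    PySem.Set.len (PySem.Set.ofList l) = PySem.Set.len (PySem.Set.ofList l') := by
  have h1 : (PySem.Set.ofList l).toFinset = (PySem.Set.ofList l').toFinset := by
    ext x
    simp [List.mem_toFinset, PySem.Set.mem_ofList, hp.mem_iff]
  have c1 := List.toFinset_card_of_nodup (PySem.Set.nodup_ofList l)
  have c2 := List.toFinset_card_of_nodup (PySem.Set.nodup_ofList l')
  simp only [PySem.Set.len]
  rw [← c1, ← c2, h1]

theorem pv_flush_perm {c0 c0' : Int × Int} {t t' : List (Int × Int)} (hp : (c0 :: t).Perm (c0' :: t')) :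
    ((c0 :: t).all (fun c => c.1 == c0.1)) = ((c0' :: t').all (fun c => c.1 == c0'.1)) := by
  rw [Bool.eq_iff_iff]
  simp only [List.all_eq_true, beq_iff_eq]
  constructor
  · intro h x hx
    have h0 : c0'.1 = c0.1 := h _ (hp.mem_iff.mpr (List.mem_cons_self))
    rw [h _ (hp.mem_iff.mpr hx), h0]
  · intro h x hx
    have h0 : c0.1 = c0'.1 := h _ (hp.mem_iff.mp (List.mem_cons_self))
    rw [h _ (hp.mem_iff.mp hx), h0]

theorem pvB_rank_perm {l l' : List (Int × Int)} (hp : l.Perm l') : pvB_rank l = pvB_rank l' := by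
  cases l with
  | nil =>
    have hl' : l' = [] := hp.symm.eq_nil
    subst hl'
    rfl
  | cons c0 t =>
    cases l' with
    | nil => exact absurd hp.length_eq (by simp)
    | cons c0' t' =>
      have hv : ((c0 :: t).map (fun c => c.2)).Perm ((c0' :: t').map (fun c => c.2)) := hp.map _
      have hcnt : PySem.List.max? (((c0 :: t).map (fun c => c.2)).map
            (fun v => ((((c0 :: t).map (fun c => c.2)).count v : Int)))) (fun x => x)
          = PySem.List.max? (((c0' :: t').map (fun c => c.2)).map
            (fun v => ((((c0' :: t').map (fun c => c.2)).count v : Int)))) (fun x => x) := by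
        rw [pv_max_id_perm (hv.map _)]
        congr 1
        exact List.map_congr_left (fun v _ => by rw [hv.count_eq])
      simp only [pvB_rank]
      rw [pv_setlen_perm hv, hcnt, pv_flush_perm hp, pv_max_id_perm hv, pv_min_id_perm hv]

-- On a hand sorted (ascending) by card value, A's positional classification agrees with B's
-- distinct/multiplicity classification.
theorem pvA_rank_sorted (h : List (Int × Int)) (hlen : h.length = 5)
    (hsort : h.Pairwise (fun a b => a.2 ≤ b.2)) : pvA_hand_rank h = pvB_rank h := by
  match h, hlen with
  | [a, b, c, d, e], _ =>
    simp only [List.pairwise_cons] at hsort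
    obtain ⟨ha, hb, hc, hd, -⟩ := hsort
    simpa using pv_rank_core a.1 b.1 c.1 d.1 e.1 a.2 b.2 c.2 d.2 e.2
      (ha b (by simp)) (hb c (by simp)) (hc d (by simp)) (hd e (by simp))

theorem rank_eq (cards : List (Int × Int)) (hlen : cards.length = 5) :
    pvA_hand_rank (pvA_sort_hand cards) = pvB_rank cards := by
  have hperm : (pvA_sort_hand cards).Perm cards :=
    (PySem.List.sorted_perm _ _ _).trans (PySem.List.sorted_perm _ _ _)
  have hlen' : (pvA_sort_hand cards).length = 5 := hperm.length_eq.trans hlen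
  have hs : (pvA_sort_hand cards).Pairwise (fun a b => a.2 ≤ b.2) :=
    PySem.List.sorted_pairwise _ _
  rw [pvA_rank_sorted _ hlen' hs, pvB_rank_perm hperm]

-- the two accumulation loops, over the same per-card ranks
theorem loop_eq (P Q : (Int × Int) → Int) (l : List (Int × Int)) (u u2 : List Int) (w lo : Int) :
    (l.foldl (fun (acc : List Int × List Int) dc =>
      if P dc == Q dc then (acc.1 ++ [0], acc.2 ++ [0])
      else if P dc < Q dc then (acc.1 ++ [(1 : Int)], acc.2 ++ [(1 : Int) * 1])
      else (acc.1 ++ [-(1 : Int)], acc.2 ++ [-(1 : Int) * -1])) (u, u2)).1.sum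
      = u.sum + ((l.foldl (fun (acc : Int × Int) dc =>
          if P dc < Q dc then (acc.1 + 1, acc.2)
          else if Q dc < P dc then (acc.1, acc.2 + 1)
          else acc) (w, lo)).1 - w)
        - ((l.foldl (fun (acc : Int × Int) dc =>
          if P dc < Q dc then (acc.1 + 1, acc.2)
          else if Q dc < P dc then (acc.1, acc.2 + 1)
          else acc) (w, lo)).2 - lo)
    ∧ (l.foldl (fun (acc : List Int × List Int) dc =>
      if P dc == Q dc then (acc.1 ++ [0], acc.2 ++ [0])
      else if P dc < Q dc then (acc.1 ++ [(1 : Int)], acc.2 ++ [(1 : Int) * 1])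
      else (acc.1 ++ [-(1 : Int)], acc.2 ++ [-(1 : Int) * -1])) (u, u2)).2.sum
      = u2.sum + ((l.foldl (fun (acc : Int × Int) dc =>
          if P dc < Q dc then (acc.1 + 1, acc.2)
          else if Q dc < P dc then (acc.1, acc.2 + 1)
          else acc) (w, lo)).1 - w)
        + ((l.foldl (fun (acc : Int × Int) dc =>
          if P dc < Q dc then (acc.1 + 1, acc.2)
          else if Q dc < P dc then (acc.1, acc.2 + 1)
          else acc) (w, lo)).2 - lo) := by
  induction l generalizing u u2 w lo with
  | nil => simp
  | cons x t ih =>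
    simp only [List.foldl_cons]
    rcases lt_trichotomy (P x) (Q x) with hlt | heq | hgt
    · rw [if_neg (by simp [hlt.ne]), if_pos hlt, if_pos hlt]
      refine ⟨?_, ?_⟩
      · rw [(ih (u ++ [1]) (u2 ++ [1 * 1]) (w + 1) lo).1]
        simp only [List.sum_append, List.sum_cons, List.sum_nil]; omega
      · rw [(ih (u ++ [1]) (u2 ++ [1 * 1]) (w + 1) lo).2]
        simp only [List.sum_append, List.sum_cons, List.sum_nil]; omega
    · rw [if_pos (by simp [heq]), if_neg (by omega), if_neg (by omega)]
      refine ⟨?_, ?_⟩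
      · rw [(ih (u ++ [0]) (u2 ++ [0]) w lo).1]
        simp only [List.sum_append, List.sum_cons, List.sum_nil]; omega
      · rw [(ih (u ++ [0]) (u2 ++ [0]) w lo).2]
        simp only [List.sum_append, List.sum_cons, List.sum_nil]; omega
    · rw [if_neg (by simp [hgt.ne']), if_neg (by omega), if_neg (by omega), if_pos hgt]
      refine ⟨?_, ?_⟩
      · rw [(ih (u ++ [-1]) (u2 ++ [-1 * -1]) w (lo + 1)).1]
        simp only [List.sum_append, List.sum_cons, List.sum_nil]; omega
      · rw [(ih (u ++ [-1]) (u2 ++ [-1 * -1]) w (lo + 1)).2]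
        simp only [List.sum_append, List.sum_cons, List.sum_nil]; omega

-- ===== VERDICT (by name: the statement is the Claim_ definition above) =====
theorem poker_player_utility_spec : Claim_equal_poker_player_utility := by
  intro player sp condition _ hpre
  unfold Spec_poker_player_utility poker_player_utility poker_player_utility_alt
  rcases hpre with hnil | ⟨h1, h2⟩
  · subst hnil; simp
  · have e1 : ∀ dc : Int × Int, pvA_hand_rank (pvA_sort_hand (sp.1 ++ [dc])) = pvB_rank (sp.1 ++ [dc]) :=
      fun dc => rank_eq _ (by simp [h1])
    have e2 : ∀ dc : Int × Int, pvA_hand_rank (pvA_sort_hand (sp.2 ++ [dc])) = pvB_rank (sp.2 ++ [dc]) :=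
      fun dc => rank_eq _ (by simp [h2])
    by_cases hp : (player == 1) = true
    · simp only [hp, if_true, e1, e2]
      have L := loop_eq (fun dc => pvB_rank (sp.1 ++ [dc])) (fun dc => pvB_rank (sp.2 ++ [dc]))
        condition [] [] 0 0
      refine Prod.ext rfl (Prod.ext ?_ ?_)
      · rw [L.1]; simp
      · rw [L.2]; simp
    · simp only [hp, if_false, Bool.false_eq_true, e1, e2]
      have L := loop_eq (fun dc => pvB_rank (sp.2 ++ [dc])) (fun dc => pvB_rank (sp.1 ++ [dc]))
        condition [] [] 0 0
      refine Prod.ext rfl (Prod.ext ?_ ?_)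
      · rw [L.1]; simp
      · rw [L.2]; simp
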